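-- pv_equiv track=rewrite | github.com/nguyenvulebinh/spoken-norm | utils.py | merge_span
-- ===== SOURCE A (Python) =====
-- def merge_span(words, tags):
--     spans, span_tags = [], []
--     current_tag = 'O'
--     span = []
--     for w, t in zip(words, tags):
--         w = w.strip(":-")
--         if len(w) == 0:
--             continue
--         t_info = t.split('-')
--         if t_info[-1] != current_tag or t_info[0] == 'B':
--             if len(span) > 0:
--                 spans.append(' '.join(span))
--                 span_tags.append(current_tag)
--             span = [w]
--             current_tag = t_info[-1]
--         else:
--             span.append(w)
--     if len(span) > 0:
--         spans.append(' '.join(span))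
--         span_tags.append(current_tag)
--     return spans, span_tags
-- ===== SOURCE B (Python) =====
-- def merge_span(words, tags):
--     # Pass 1: keep only the non-empty stripped words, each with its tag prefix and tail.
--     kept = []
--     for w, t in zip(words, tags):
--         w = w.strip(':-')
--         if w:
--             p = t.split('-')
--             kept.append((w, p[0], p[-1]))
--     # Pass 2: two-pointer sweep over runs: for each span, an inner scan finds where
--     # it ends (a differing tail or a 'B' prefix), then the whole span is emitted at
--     # once; no current_tag/partial-span state is carried between tokens.
--     spans, span_tags = [], []
--     i = 0
--     while i < len(kept):
--         tail = kept[i][2]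
--         j = i + 1
--         while j < len(kept) and kept[j][2] == tail and kept[j][1] != 'B':
--             j += 1
--         spans.append(' '.join(w for w, _, _ in kept[i:j]))
--         span_tags.append(tail)
--         i = j
--     return spans, span_tags
-- ===== Notes on version B (the rewrite author's own statement) =====
-- stated objective: alternative
-- what changed: Replaces A's per-token state machine (current_tag, growing span list, duplicated end-of-loop flush) by a two-pointer run-peeling sweep: tokens are filtered once, then for each span an inner scan locates its end and the complete span is sliced out and emitted at once, with no state carried between tokens.
import Mathlib
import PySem

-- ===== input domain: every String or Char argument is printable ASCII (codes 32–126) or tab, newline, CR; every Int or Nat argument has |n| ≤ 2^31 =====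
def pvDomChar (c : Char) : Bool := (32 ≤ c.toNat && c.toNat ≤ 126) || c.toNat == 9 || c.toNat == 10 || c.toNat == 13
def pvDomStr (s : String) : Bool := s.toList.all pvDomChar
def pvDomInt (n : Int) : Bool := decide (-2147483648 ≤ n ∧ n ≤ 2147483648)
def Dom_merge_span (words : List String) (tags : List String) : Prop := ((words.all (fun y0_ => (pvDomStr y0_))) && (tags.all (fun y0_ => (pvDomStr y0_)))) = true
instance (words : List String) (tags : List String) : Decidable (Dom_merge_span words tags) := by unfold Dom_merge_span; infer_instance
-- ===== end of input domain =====

-- B replaces A's per-token state machine (current_tag, partial span, duplicated flush) by a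
-- two-pointer sweep: filter once, then for each span an inner scan finds its end and the
-- whole span is emitted at once; objective: alternative (same O(n) cost, no carried state).

-- ===== PORT A =====
-- one iteration of A's for-loop; state = (spans, span_tags, current_tag, span)
-- t.split('-') always yields a nonempty list, so t_info[-1]/t_info[0] are getLastD/headD
def mergeStepA (st : List String × List String × String × List String) (wt : String × String) :
    List String × List String × String × List String :=
  match st with
  | (spans, span_tags, current_tag, span) =>
    let w := PySem.Str.stripChars wt.1 ":-"
    if PySem.Str.len w = 0 then (spans, span_tags, current_tag, span)
    else
      let t_info := (PySem.Str.split? wt.2 "-").getD []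
      if (t_info.getLastD "" != current_tag || t_info.headD "" == "B") then
        if span.length > 0 then
          (spans ++ [PySem.Str.join " " span], span_tags ++ [current_tag], t_info.getLastD "", [w])
        else (spans, span_tags, t_info.getLastD "", [w])
      else (spans, span_tags, current_tag, span ++ [w])

def merge_span (words : List String) (tags : List String) : List String × List String :=
  match (words.zip tags).foldl mergeStepA ([], [], "O", []) with
  | (spans, span_tags, current_tag, span) =>
    if span.length > 0 then
      (spans ++ [PySem.Str.join " " span], span_tags ++ [current_tag])
    else (spans, span_tags)

-- ===== PORT B =====
-- default for getD; Source B only indexes kept in range, so getD is exact there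
def pvTokD : String × String × String := ("", "", "")

-- pass 1 of Source B: a kept token is (stripped word, tag prefix, tag tail)
def keptTok (wt : String × String) : Option (String × String × String) :=
  let w := PySem.Str.stripChars wt.1 ":-"
  if PySem.Str.len w = 0 then none
  else
    let p := (PySem.Str.split? wt.2 "-").getD []
    some (w, p.headD "", p.getLastD "")

-- Source B's inner while loop: advance j while kept[j] continues the run with tail tl
def scanEnd (kept : List (String × String × String)) (tl : String) (j : Nat) : Nat :=
  if h : j < kept.length ∧
      (((kept.getD j pvTokD).2.2 == tl) && ((kept.getD j pvTokD).2.1 != "B")) = true then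
    scanEnd kept tl (j + 1)
  else j
termination_by kept.length - j
decreasing_by omega

theorem scanEnd_ge (kept : List (String × String × String)) (tl : String) (j : Nat) :
    j ≤ scanEnd kept tl j := by
  unfold scanEnd
  split
  · have := scanEnd_ge kept tl (j + 1); omega
  · exact le_refl j
termination_by kept.length - j
decreasing_by omega

-- Source B's outer while loop; kept[i:j] is in range, so drop/take is the exact slice
def sweepB (kept : List (String × String × String)) (i : Nat)
    (spans span_tags : List String) : List String × List String :=
  if h : i < kept.length then
    sweepB kept (scanEnd kept (kept.getD i pvTokD).2.2 (i + 1))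
      (spans ++ [PySem.Str.join " "
        (((kept.drop i).take (scanEnd kept (kept.getD i pvTokD).2.2 (i + 1) - i)).map (·.1))])
      (span_tags ++ [(kept.getD i pvTokD).2.2])
  else (spans, span_tags)
termination_by kept.length - i
decreasing_by have := scanEnd_ge kept ((kept.getD i pvTokD).2.2) (i + 1); omega

def merge_span_alt (words : List String) (tags : List String) : List String × List String :=
  let kept := (words.zip tags).filterMap keptTok
  sweepB kept 0 [] []

-- ===== PRECONDITION & SPEC =====
def Spec_merge_span (words : List String) (tags : List String) (out : List String × List String) : Prop := out = merge_span_alt words tags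
instance (words : List String) (tags : List String) (out : List String × List String) : Decidable (Spec_merge_span words tags out) := by unfold Spec_merge_span; infer_instance

-- ===== CLAIM (what is proved, stated in full; the proofs are below) =====
def Claim_equal_merge_span : Prop := ∀ (words : List String) (tags : List String), Dom_merge_span words tags → Spec_merge_span words tags (merge_span words tags)

-- ===== LEMMAS AND PROOFS =====

-- the continuation predicate of a run with tail tl
def runP (tl : String) (x : String × String × String) : Bool := (x.2.2 == tl) && (x.2.1 != "B")

-- A's loop step restricted to a kept token (stripped word, prefix, tail)
def stepA' (st : List String × List String × String × List String) (tok : String × String × String) :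
    List String × List String × String × List String :=
  match st with
  | (spans, span_tags, current_tag, span) =>
    if (tok.2.2 != current_tag || tok.2.1 == "B") then
      if span.length > 0 then
        (spans ++ [PySem.Str.join " " span], span_tags ++ [current_tag], tok.2.2, [tok.1])
      else (spans, span_tags, tok.2.2, [tok.1])
    else (spans, span_tags, current_tag, span ++ [tok.1])

-- A's final flush
def flushA (st : List String × List String × String × List String) : List String × List String :=
  match st with
  | (spans, span_tags, current_tag, span) =>
    if span.length > 0 then
      (spans ++ [PySem.Str.join " " span], span_tags ++ [current_tag])
    else (spans, span_tags)

-- run-peeling recursion on the suffix of kept tokens (reference shape of B's sweep)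
def recB : List (String × String × String) → List String × List String
  | [] => ([], [])
  | h :: rest =>
    let r := recB (rest.dropWhile (runP h.2.2))
    (PySem.Str.join " " (h.1 :: (rest.takeWhile (runP h.2.2)).map (·.1)) :: r.1,
     h.2.2 :: r.2)
termination_by l => l.length
decreasing_by
  have := List.length_dropWhile_le (runP h.2.2) rest
  simp; omega

-- skipped tokens are no-ops for A, so A's fold over zip equals the fold over the kept tokens
theorem foldA_filter (l : List (String × String)) (st : List String × List String × String × List String) :
    l.foldl mergeStepA st = (l.filterMap keptTok).foldl stepA' st := by
  induction l generalizing st with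
  | nil => rfl
  | cons wt rest ih =>
    by_cases h : PySem.Str.len (PySem.Str.stripChars wt.1 ":-") = 0
    · obtain ⟨spans, span_tags, current_tag, span⟩ := st
      have h' : PySem.Chars.stripChars wt.1.toList [':', '-'] = [] := by simpa using h
      simp [keptTok, mergeStepA, ih, h']
    · have hk : keptTok wt = some (PySem.Str.stripChars wt.1 ":-",
          ((PySem.Str.split? wt.2 "-").getD []).headD "",
          ((PySem.Str.split? wt.2 "-").getD []).getLastD "") := by
        have h' : ¬ PySem.Chars.stripChars wt.1.toList [':', '-'] = [] := by simpa using h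
        simp [keptTok, h']
      have hstep : mergeStepA st wt = stepA' st (PySem.Str.stripChars wt.1 ":-",
          ((PySem.Str.split? wt.2 "-").getD []).headD "",
          ((PySem.Str.split? wt.2 "-").getD []).getLastD "") := by
        obtain ⟨spans, span_tags, current_tag, span⟩ := st
        simp only [mergeStepA, stepA', if_neg h]
      rw [List.foldl_cons, List.filterMap_cons, hk, List.foldl_cons, hstep, ih]

-- main invariant: running A with an open span (tail tl, words sp) peels exactly the run of tl
theorem loop_corr (toks : List (String × String × String)) (G T : List String)
    (tl : String) (sp : List String) (hsp : sp ≠ []) :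
    flushA (toks.foldl stepA' (G, T, tl, sp))
      = (G ++ [PySem.Str.join " " (sp ++ (toks.takeWhile (runP tl)).map (·.1))]
            ++ (recB (toks.dropWhile (runP tl))).1,
         T ++ [tl] ++ (recB (toks.dropWhile (runP tl))).2) := by
  induction toks generalizing G T tl sp with
  | nil => simp [flushA, recB, List.length_pos_iff.mpr hsp]
  | cons x xs ih =>
    by_cases hp : runP tl x = true
    · have hc : (x.2.2 != tl || x.2.1 == "B") = false := by
        simp [runP] at hp; simp [hp.1, hp.2]
      have hA : stepA' (G, T, tl, sp) x = (G, T, tl, sp ++ [x.1]) := by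
        simp [stepA', hc]
      rw [List.foldl_cons, hA, ih G T tl (sp ++ [x.1]) (by simp)]
      simp [List.takeWhile_cons, hp]
    · have hc : (x.2.2 != tl || x.2.1 == "B") = true := by
        simp [runP] at hp
        rcases Decidable.em (x.2.2 = tl) with h1 | h1
        · simp [h1, hp h1]
        · simp [h1]
      have hA : stepA' (G, T, tl, sp) x
          = (G ++ [PySem.Str.join " " sp], T ++ [tl], x.2.2, [x.1]) := by
        simp [stepA', hc, List.length_pos_iff.mpr hsp]
      simp only [List.foldl_cons, hA, List.takeWhile_cons, List.dropWhile_cons, hp]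
      rw [ih _ _ _ _ (by simp)]
      simp [recB]
    
-- A's whole loop + flush computes the run-peeling recursion
theorem foldA_recB (kept : List (String × String × String)) :
    flushA (kept.foldl stepA' ([], [], "O", [])) = recB kept := by
  cases kept with
  | nil => simp [flushA, recB]
  | cons h rest =>
    have hA : stepA' ([], [], "O", []) h = ([], [], h.2.2, [h.1]) := by
      by_cases hc : (h.2.2 != "O" || h.2.1 == "B") = true
      · simp [stepA', hc]
      · have h2 : h.2.2 = "O" := by
          simp only [Bool.or_eq_true, bne_iff_ne, ne_eq, beq_iff_eq] at hc
          exact not_not.mp fun hx => hc (Or.inl hx)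
        simp [stepA', h2]
    simp only [List.foldl_cons, hA]
    rw [loop_corr rest [] [] h.2.2 [h.1] (by simp)]
    simp [recB]

-- scanEnd finds exactly the end of the takeWhile run
theorem scanEnd_eq (kept : List (String × String × String)) (tl : String) (j : Nat) :
    scanEnd kept tl j = j + ((kept.drop j).takeWhile (runP tl)).length := by
  unfold scanEnd
  split
  · rename_i h
    have hd : kept.drop j = kept[j] :: kept.drop (j + 1) :=
      List.drop_eq_getElem_cons h.1
    have hg : kept.getD j pvTokD = kept[j] := by
      simp [List.getD, List.getElem?_eq_getElem h.1]
    have hp : runP tl kept[j] = true := by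
      rw [hg] at h; simpa [runP] using h.2
    rw [scanEnd_eq kept tl (j + 1), hd, List.takeWhile_cons, hp]
    simp; omega
  · rename_i h
    rcases Decidable.em (j < kept.length) with hj | hj
    · have hd : kept.drop j = kept[j] :: kept.drop (j + 1) :=
        List.drop_eq_getElem_cons hj
      have hg : kept.getD j pvTokD = kept[j] := by
        simp [List.getD, List.getElem?_eq_getElem hj]
      have hp : ¬ runP tl kept[j] = true := by
        intro hpp
        exact h ⟨hj, by rw [hg]; simpa [runP] using hpp⟩
      rw [hd, List.takeWhile_cons]
      simp [hp]
    · have : kept.drop j = [] := List.drop_eq_nil_of_le (by omega)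
      simp [this]
termination_by kept.length - j
decreasing_by omega

-- dropWhile is drop of the takeWhile length
theorem dropWhile_eq_drop {α : Type} (p : α → Bool) (l : List α) :
    l.dropWhile p = l.drop (l.takeWhile p).length := by
  induction l with
  | nil => rfl
  | cons x xs ih =>
    by_cases hp : p x = true
    · simp [List.dropWhile_cons, List.takeWhile_cons, hp, ih]
    · simp [List.dropWhile_cons, List.takeWhile_cons, hp]

-- B's index sweep computes the run-peeling recursion on the remaining suffix
theorem sweepB_recB (kept : List (String × String × String)) (i : Nat)
    (spans span_tags : List String) :
    sweepB kept i spans span_tags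
      = (spans ++ (recB (kept.drop i)).1, span_tags ++ (recB (kept.drop i)).2) := by
  unfold sweepB
  split
  · rename_i h
    have hd : kept.drop i = kept[i] :: kept.drop (i + 1) :=
      List.drop_eq_getElem_cons h
    have hg : kept.getD i pvTokD = kept[i] := by
      simp [List.getD, List.getElem?_eq_getElem h]
    set tw := (kept.drop (i + 1)).takeWhile (runP kept[i].2.2) with htw
    have hj : scanEnd kept (kept.getD i pvTokD).2.2 (i + 1) = (i + 1) + tw.length := by
      rw [hg, scanEnd_eq]
    have hslice : (kept.drop i).take ((i + 1) + tw.length - i) = kept[i] :: tw := by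
      rw [hd]
      have h1 : (i + 1) + tw.length - i = tw.length + 1 := by omega
      rw [h1]
      simp only [List.take_succ_cons]
      congr 1
      have hpre : tw <+: kept.drop (i + 1) := by rw [htw]; exact List.takeWhile_prefix _
      exact (List.prefix_iff_eq_take.mp hpre).symm
    have hdrop2 : kept.drop ((i + 1) + tw.length)
        = (kept.drop (i + 1)).dropWhile (runP kept[i].2.2) := by
      rw [dropWhile_eq_drop, ← htw, List.drop_drop]
    rw [hj, hslice, hg, sweepB_recB kept ((i + 1) + tw.length), hdrop2]
    conv_rhs => rw [hd]
    simp only [recB]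
    simp [← htw]
  · rename_i h
    have : kept.drop i = [] := List.drop_eq_nil_of_le (by omega)
    simp [this, recB]
termination_by kept.length - i
decreasing_by have := scanEnd_ge kept ((kept.getD i pvTokD).2.2) (i + 1); omega

-- ===== VERDICT (by name: the statement is the Claim_ definition above) =====
theorem merge_span_spec : Claim_equal_merge_span := by
  intro words tags _
  unfold Spec_merge_span merge_span_alt
  rw [sweepB_recB]
  have h1 : merge_span words tags
      = flushA ((words.zip tags).foldl mergeStepA ([], [], "O", [])) := rfl
  rw [h1, foldA_filter, foldA_recB]
  simp
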